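-- pv_equiv track=rewrite | github.com/Zoooooone/Coding-practice | algorithm/string/maximum_concatenate_length.py | maximumConcatenateLength_brute_force
-- ===== SOURCE A (Python) =====
-- from collections import defaultdict
--
-- def maximumConcatenateLength_brute_force(strings):
--     ans = 0
--     prefix_table = defaultdict(list)
--
--     for i, s in enumerate(strings):
--         prefix = s[:2]
--         prefix_table[prefix].append(i)
--
--     for s in strings:
--         suffix = s[-2:]
--         if suffix in prefix_table:
--             for i in prefix_table[suffix]:
--                 if strings[i] != s:
--                     ans = max(ans, len(strings[i]) + len(s) - 2)
--
--     return ans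
-- ===== SOURCE B (Python) =====
-- def _upd(e, s):
--     # returns the new table entry for prefix s[:2] after seeing s, or None if unchanged;
--     # entry = (longest string value, its length, best length among strings with a different value)
--     l = len(s)
--     if e is None:
--         return (s, l, None)
--     v1, l1, l2 = e
--     if s == v1:
--         return (s, l, l2) if l > l1 else None
--     if l > l1:
--         return (s, l, l1)
--     if l2 is None or l > l2:
--         return (v1, l1, l)
--     return None
--
-- def maximumConcatenateLength_brute_force(strings):
--     table = {}
--     for s in strings:
--         p = s[:2]
--         ne = _upd(table.get(p), s)
--         if ne is not None:
--             table[p] = ne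
--     ans = 0
--     for s in strings:
--         e = table.get(s[-2:])
--         if e is not None:
--             v1, l1, l2 = e
--             best = l1 if v1 != s else l2
--             if best is not None:
--                 ans = max(ans, best + len(s) - 2)
--     return ans
-- ===== Notes on version B (the rewrite author's own statement) =====
-- stated objective: faster
-- what changed: Instead of storing all indices per 2-char prefix and rescanning every one of them for each suffix, B keeps per prefix only the longest string and the best length among strings with a different value, so each suffix query is O(1).
import Mathlib
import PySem

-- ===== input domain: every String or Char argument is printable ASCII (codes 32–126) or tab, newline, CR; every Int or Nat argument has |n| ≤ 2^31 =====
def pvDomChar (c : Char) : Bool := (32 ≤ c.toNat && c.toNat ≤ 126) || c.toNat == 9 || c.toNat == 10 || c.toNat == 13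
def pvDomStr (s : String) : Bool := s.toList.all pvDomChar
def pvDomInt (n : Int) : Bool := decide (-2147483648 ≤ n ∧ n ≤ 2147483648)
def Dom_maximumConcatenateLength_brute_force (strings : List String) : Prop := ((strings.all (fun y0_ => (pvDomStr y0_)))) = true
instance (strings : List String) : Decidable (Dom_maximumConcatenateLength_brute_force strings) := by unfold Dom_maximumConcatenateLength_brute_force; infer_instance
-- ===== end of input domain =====

-- B replaces A's per-suffix scan over every index sharing the prefix by a single pass that keeps,
-- per 2-char prefix, the longest string and the best length among strings of a different value
-- (objective: faster).


-- ===== PORT A =====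
-- shared helpers for the Python primitives both sources use: s[:2], s[-2:], len(s)
def pvPref (s : String) : String := PySem.Str.slice s none (some 2)
def pvSuf (s : String) : String := PySem.Str.slice s (some (-2)) none

def maximumConcatenateLength_brute_force (strings : List String) : Int :=
  -- prefix_table[s[:2]].append(i) over enumerate(strings)  (defaultdict(list))
  let prefix_table : PySem.Dict String (List Int) :=
    (PySem.List.enumerate strings 0).foldl
      (fun d q => d.modify (pvPref q.2) [] (fun x => x ++ [q.1])) PySem.Dict.empty
  strings.foldl
    (fun ans s =>
      let suffix := pvSuf s
      if prefix_table.contains suffix then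
        (prefix_table.getD suffix []).foldl
          (fun ans i =>
            match PySem.List.pyGet? strings i with
            | none => ans  -- unreachable: the table stores only valid indices
            | some t => if t ≠ s then max ans (PySem.Str.len t + PySem.Str.len s - 2) else ans)
          ans
      else ans)
    0

-- ===== PORT B =====
-- _upd(e, s) from Source B: the new top-2 entry for prefix s[:2], or none if unchanged
def pvTop2Step (e : Option (String × Int × Option Int)) (s : String) :
    Option (String × Int × Option Int) :=
  let l := PySem.Str.len s
  match e with
  | none => some (s, l, none)
  | some (v1, l1, l2) =>
    if s = v1 then (if l > l1 then some (s, l, l2) else none)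
    else if l > l1 then some (s, l, some l1)
    else
      match l2 with
      | none => some (v1, l1, some l)
      | some l2' => if l > l2' then some (v1, l1, some l) else none

def maximumConcatenateLength_brute_force_alt (strings : List String) : Int :=
  let table : PySem.Dict String (String × Int × Option Int) :=
    strings.foldl
      (fun d s =>
        let p := pvPref s
        match pvTop2Step (d.get? p) s with
        | none => d
        | some ne => d.insert p ne)
      PySem.Dict.empty
  strings.foldl
    (fun ans s =>
      match table.get? (pvSuf s) with
      | none => ans
      | some (v1, l1, l2) =>
        match (if v1 ≠ s then some l1 else l2) with
        | none => ans
        | some b => max ans (b + PySem.Str.len s - 2))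
    0

-- ===== PRECONDITION & SPEC =====
def Spec_maximumConcatenateLength_brute_force (strings : List String) (out : Int) : Prop := out = maximumConcatenateLength_brute_force_alt strings
instance (strings : List String) (out : Int) : Decidable (Spec_maximumConcatenateLength_brute_force strings out) := by unfold Spec_maximumConcatenateLength_brute_force; infer_instance

-- ===== CLAIM (what is proved, stated in full; the proofs are below) =====
def Claim_equal_maximumConcatenateLength_brute_force : Prop := ∀ (strings : List String), Dom_maximumConcatenateLength_brute_force strings → Spec_maximumConcatenateLength_brute_force strings (maximumConcatenateLength_brute_force strings)

-- ===== LEMMAS AND PROOFS =====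

-- the best (maximal) length among elements of g different from s, as both folds compute it
def pvBestOther : List String → String → Option Int
  | [], _ => none
  | t :: g, s =>
    if t = s then pvBestOther g s
    else
      match pvBestOther g s with
      | none => some (PySem.Str.len t)
      | some m => some (max m (PySem.Str.len t))

theorem pvBestOther_append (h : List String) (x s : String) :
    pvBestOther (h ++ [x]) s =
      if x = s then pvBestOther h s
      else
        match pvBestOther h s with
        | none => some (PySem.Str.len x)
        | some m => some (max m (PySem.Str.len x)) := by
  induction h with
  | nil => simp [pvBestOther]
  | cons t h ih =>
    simp only [List.cons_append, pvBestOther, ih]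
    by_cases hts : t = s <;> by_cases hxs : x = s <;>
      simp [hts, hxs] <;> rcases pvBestOther h s <;>
      (simp; omega)

theorem pvBestOther_mem (g : List String) (s : String) (m : Int)
    (hm : pvBestOther g s = some m) : ∃ t ∈ g, m = PySem.Str.len t := by
  induction g generalizing m with
  | nil => simp [pvBestOther] at hm
  | cons t g ih =>
    simp only [pvBestOther] at hm
    by_cases hts : t = s
    · simp [hts] at hm
      obtain ⟨u, hu, hm⟩ := ih m hm
      exact ⟨u, by simp [hu], hm⟩
    · simp only [hts, if_false] at hm
      rcases hb : pvBestOther g s with _ | m'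
      · rw [hb] at hm
        exact ⟨t, by simp, by simpa using hm.symm⟩
      · rw [hb] at hm
        simp only [Option.some.injEq] at hm
        rcases max_cases m' (PySem.Str.len t) with ⟨hmax, _⟩ | ⟨hmax, _⟩
        · obtain ⟨u, hu, he⟩ := ih m' hb
          exact ⟨u, by simp [hu], by omega⟩
        · exact ⟨t, by simp, by omega⟩

theorem pvBestOther_eq_of_max (g : List String) (v s : String)
    (hv : v ∈ g) (hvs : v ≠ s) (hle : ∀ t ∈ g, PySem.Str.len t ≤ PySem.Str.len v) :
    pvBestOther g s = some (PySem.Str.len v) := by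
  induction g with
  | nil => simp at hv
  | cons t g ih =>
    simp only [pvBestOther]
    by_cases hts : t = s
    · have hvg : v ∈ g := by
        rcases List.mem_cons.mp hv with h | h
        · exact absurd (h ▸ hts) hvs
        · exact h
      simp only [hts, if_true]
      exact ih hvg (fun u hu => hle u (List.mem_cons_of_mem _ hu))
    · simp only [hts, if_false]
      have hvt : v = t → PySem.Str.len v = PySem.Str.len t := fun h => by rw [h]
      rcases List.mem_cons.mp hv with h | h
      · rcases hb : pvBestOther g s with _ | m'
        · simp only [← h]
        · obtain ⟨u, hu, he⟩ := pvBestOther_mem g s m' hb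
          have h2 := hle u (List.mem_cons_of_mem _ hu)
          have h3 := hvt h
          have hmx : max m' (PySem.Str.len v) = PySem.Str.len v := by omega
          simp only [← h3, hmx]
      · rw [ih h (fun u hu => hle u (List.mem_cons_of_mem _ hu))]
        have := hle t (by simp)
        have hmx : max (PySem.Str.len v) (PySem.Str.len t) = PySem.Str.len v := by omega
        simp only [hmx]

-- ----- A side -----

theorem pvMaxShift (a l m c : Int) :
    max (max a (l + c - 2)) (m + c - 2) = max a (max m l + c - 2) := by
  simp only [max_def]; split_ifs <;> omega

-- A's inner loop over the lengths of group members ≠ s is a running max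
theorem foldA_eq_bestOther (g : List String) (s : String) (ans : Int) :
    g.foldl (fun a t => if t ≠ s then max a (PySem.Str.len t + PySem.Str.len s - 2) else a) ans
      = match pvBestOther g s with
        | none => ans
        | some m => max ans (m + PySem.Str.len s - 2) := by
  induction g generalizing ans with
  | nil => simp [pvBestOther]
  | cons t g ih =>
    simp only [List.foldl_cons, pvBestOther]
    by_cases hts : t = s
    · simp only [hts, if_true, ne_eq, not_true_eq_false, if_false]
      exact ih ans
    · simp only [hts, if_false, ne_eq, not_false_eq_true, if_true, ih]
      cases hb : pvBestOther g s with
      | none => rfl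
      | some m => simp only [pvMaxShift]

-- the indices A stores under key p are exactly the enumerate-positions whose prefix is p
theorem tableA_getD (strings : List String) (p : String) :
    (((PySem.List.enumerate strings 0).foldl
        (fun d q => d.modify (pvPref q.2) [] (fun x => x ++ [q.1]))
        (PySem.Dict.empty : PySem.Dict String (List Int))).getD p [])
      = ((PySem.List.enumerate strings 0).filter (fun q => pvPref q.2 == p)).map (fun q => q.1) := by
  have h1 : ∀ (d : PySem.Dict String (List Int)),
      (PySem.List.enumerate strings 0).foldl (fun d q => d.modify (pvPref q.2) [] (fun x => x ++ [q.1])) d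
        = (((PySem.List.enumerate strings 0).map (fun q => (pvPref q.2, q.1))).foldl
            (fun d p => d.modify p.1 [] (fun x => x ++ [p.2])) d) := by
    intro d; rw [List.foldl_map]
  rw [h1, PySem.Dict.getD_foldl_modify_append, List.filter_map, List.map_map]
  rfl

-- if key p is absent from A's table, no element has prefix p
theorem tableA_contains (strings : List String) (p : String)
    (hc : (((PySem.List.enumerate strings 0).foldl
        (fun d q => d.modify (pvPref q.2) [] (fun x => x ++ [q.1]))
        (PySem.Dict.empty : PySem.Dict String (List Int))).contains p) = false) :
    strings.filter (fun t => pvPref t == p) = [] := by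
  have hk := PySem.Dict.keys_foldl_modify_key (PySem.List.enumerate strings 0)
    (fun q => pvPref q.2) ([] : List Int) (fun _ q => (fun x => x ++ [q.1]))
    (PySem.Dict.empty : PySem.Dict String (List Int))
  rw [List.filter_eq_nil_iff]
  intro t ht hpt
  have hpt' : pvPref t = p := by simpa using hpt
  have ht2 : t ∈ (PySem.List.enumerate strings 0).map (fun x => x.2) := by
    rw [PySem.List.map_snd_enumerate]; exact ht
  obtain ⟨q, hq, hq2⟩ := List.mem_map.mp ht2
  have hmem : p ∈ ((PySem.List.enumerate strings 0).map (fun q => pvPref q.2)) :=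
    List.mem_map.mpr ⟨q, hq, by rw [hq2, hpt']⟩
  have hcon : (((PySem.List.enumerate strings 0).foldl
      (fun d q => d.modify (pvPref q.2) [] (fun x => x ++ [q.1]))
      (PySem.Dict.empty : PySem.Dict String (List Int))).contains p) = true := by
    rw [PySem.Dict.contains_iff_mem_keys, hk]
    simpa [PySem.Dict.keys_empty, PySem.Set.update_nil_left, PySem.Set.mem_ofList] using hmem
  simp [hc] at hcon

-- elements of enumerate look themselves up
theorem enum_lookup (strings : List String) (q : Int × String)
    (hq : q ∈ PySem.List.enumerate strings 0) :
    PySem.List.pyGet? strings q.1 = some q.2 := by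
  obtain ⟨k, hk, rfl⟩ := (PySem.List.mem_enumerate_iff strings 0 q).mp hq
  simp [PySem.List.pyGet?_natCast, List.getElem?_eq_getElem hk]

-- map ·.2 of the prefix-filtered enumerate is the prefix-filtered list
theorem filter_enum_snd (strings : List String) (p : String) :
    ((PySem.List.enumerate strings 0).filter (fun q => pvPref q.2 == p)).map (fun q => q.2)
      = strings.filter (fun t => pvPref t == p) := by
  conv_rhs => rw [← PySem.List.map_snd_enumerate strings 0]
  rw [List.filter_map]
  rfl

-- ----- B side -----

-- per-key effect of B's building loop
def pvOStep (o : Option (String × Int × Option Int)) (s : String) :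
    Option (String × Int × Option Int) :=
  match pvTop2Step o s with
  | none => o
  | some v => some v

theorem tableB_get? (l : List String) (d : PySem.Dict String (String × Int × Option Int))
    (p : String) :
    (l.foldl (fun d s =>
        match pvTop2Step (d.get? (pvPref s)) s with
        | none => d
        | some ne => d.insert (pvPref s) ne) d).get? p
      = (l.filter (fun s => pvPref s == p)).foldl pvOStep (d.get? p) := by
  induction l generalizing d with
  | nil => simp
  | cons s l ih =>
    simp only [List.foldl_cons, List.filter_cons]
    by_cases hp : pvPref s = p
    · subst hp
      simp only [beq_self_eq_true, if_true, List.foldl_cons, ih]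
      rcases h : pvTop2Step (d.get? (pvPref s)) s with _ | v <;>
        simp [pvOStep, h, PySem.Dict.get?_insert_self]
    · have : (pvPref s == p) = false := by simpa using hp
      rw [this]
      simp only [Bool.false_eq_true, if_false, ih]
      rcases h : pvTop2Step (d.get? (pvPref s)) s with _ | v
      · rfl
      · rw [PySem.Dict.get?_insert_of_ne _ _ (Ne.symm hp)]

-- the invariant B's top-2 entry satisfies over the processed group
def pvInv (h : List String) : Option (String × Int × Option Int) → Prop
  | none => h = []
  | some (v1, l1, l2) =>
      v1 ∈ h ∧ l1 = PySem.Str.len v1 ∧ (∀ t ∈ h, PySem.Str.len t ≤ l1) ∧ l2 = pvBestOther h v1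

theorem pvInv_step (h : List String) (o : Option (String × Int × Option Int)) (x : String)
    (hinv : pvInv h o) : pvInv (h ++ [x]) (pvOStep o x) := by
  rcases o with _ | ⟨v1, l1, l2⟩
  · simp only [pvInv] at hinv
    subst hinv
    exact ⟨by simp, rfl, by intro t ht; simp at ht; simp [ht], by simp [pvBestOther]⟩
  · obtain ⟨hv1, hl1, hle, hl2⟩ := hinv
    have hle' : ∀ t ∈ h, PySem.Str.len t ≤ PySem.Str.len v1 := by rw [← hl1]; exact hle
    by_cases hxv : x = v1
    · have hlen : PySem.Str.len x = l1 := by rw [hxv, hl1]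
      have hng : ¬ PySem.Str.len x > l1 := by omega
      have hstep : pvOStep (some (v1, l1, l2)) x = some (v1, l1, l2) := by
        simp only [pvOStep, pvTop2Step]
        rw [if_pos hxv, if_neg hng]
      rw [hstep]
      refine ⟨by simp [hv1], hl1, ?_, ?_⟩
      · intro t ht
        rcases List.mem_append.mp ht with ht | ht
        · exact hle t ht
        · rw [List.mem_singleton.mp ht]; omega
      · rw [pvBestOther_append h x v1, if_pos hxv]
        exact hl2
    · by_cases hgt : PySem.Str.len x > l1
      · have hstep : pvOStep (some (v1, l1, l2)) x
            = some (x, PySem.Str.len x, some l1) := by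
          simp only [pvOStep, pvTop2Step]
          rw [if_neg hxv, if_pos hgt]
        rw [hstep]
        refine ⟨by simp, rfl, ?_, ?_⟩
        · intro t ht
          rcases List.mem_append.mp ht with ht | ht
          · have := hle t ht; omega
          · rw [List.mem_singleton.mp ht]
        · rw [pvBestOther_append h x x, if_pos rfl,
            pvBestOther_eq_of_max h v1 x hv1 (fun hh => hxv hh.symm) hle', hl1]
      · have hxle : PySem.Str.len x ≤ l1 := by omega
        have hmemle : ∀ t ∈ h ++ [x], PySem.Str.len t ≤ l1 := by
          intro t ht
          rcases List.mem_append.mp ht with ht | ht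
          · exact hle t ht
          · rw [List.mem_singleton.mp ht]; exact hxle
        rcases l2 with _ | l2'
        · have hstep : pvOStep (some (v1, l1, none)) x
              = some (v1, l1, some (PySem.Str.len x)) := by
            simp only [pvOStep, pvTop2Step]
            rw [if_neg hxv, if_neg hgt]
          rw [hstep]
          refine ⟨by simp [hv1], hl1, hmemle, ?_⟩
          rw [pvBestOther_append h x v1, if_neg hxv, ← hl2]
        · by_cases hgt2 : PySem.Str.len x > l2'
          · have hstep : pvOStep (some (v1, l1, some l2')) x
                = some (v1, l1, some (PySem.Str.len x)) := by
              simp only [pvOStep, pvTop2Step]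
              rw [if_neg hxv, if_neg hgt, if_pos hgt2]
            rw [hstep]
            refine ⟨by simp [hv1], hl1, hmemle, ?_⟩
            have hmx : max l2' (PySem.Str.len x) = PySem.Str.len x := by omega
            simp only [pvBestOther_append h x v1, if_neg hxv, ← hl2, hmx]
          · have hstep : pvOStep (some (v1, l1, some l2')) x
                = some (v1, l1, some l2') := by
              simp only [pvOStep, pvTop2Step]
              rw [if_neg hxv, if_neg hgt, if_neg hgt2]
            rw [hstep]
            refine ⟨by simp [hv1], hl1, hmemle, ?_⟩
            have hmx : max l2' (PySem.Str.len x) = l2' := by omega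
            simp only [pvBestOther_append h x v1, if_neg hxv, ← hl2, hmx]

theorem pvInv_fold (g : List String) :
    ∀ (h : List String) (o : Option (String × Int × Option Int)),
      pvInv h o → pvInv (h ++ g) (g.foldl pvOStep o) := by
  induction g with
  | nil => intro h o hi; simpa using hi
  | cons x g ih =>
    intro h o hi
    have := ih (h ++ [x]) (pvOStep o x) (pvInv_step h o x hi)
    simpa using this

-- the O(1) lookup B performs on a top-2 entry
def pvQuery (o : Option (String × Int × Option Int)) (s : String) : Option Int :=
  match o with
  | none => none
  | some (v1, l1, l2) => if v1 ≠ s then some l1 else l2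

theorem pvInv_query (g : List String) (o : Option (String × Int × Option Int)) (s : String)
    (hinv : pvInv g o) : pvQuery o s = pvBestOther g s := by
  unfold pvQuery
  rcases o with _ | ⟨v1, l1, l2⟩
  · simp only [pvInv] at hinv
    subst hinv
    simp [pvBestOther]
  · obtain ⟨hv1, hl1, hle, hl2⟩ := hinv
    by_cases hvs : v1 = s
    · simp [hvs, hl2]
    · simp only [ne_eq, hvs, not_false_eq_true, if_true]
      rw [pvBestOther_eq_of_max g v1 s hv1 hvs (by rw [← hl1]; exact hle), hl1]

-- A's step for one s: membership test + index scan = running max over the prefix group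
theorem stepA_eq (strings : List String) (p s : String) (ans : Int) :
    (if (((PySem.List.enumerate strings 0).foldl
          (fun d q => d.modify (pvPref q.2) [] (fun x => x ++ [q.1]))
          (PySem.Dict.empty : PySem.Dict String (List Int))).contains p) then
        ((((PySem.List.enumerate strings 0).foldl
          (fun d q => d.modify (pvPref q.2) [] (fun x => x ++ [q.1]))
          (PySem.Dict.empty : PySem.Dict String (List Int))).getD p []).foldl
          (fun ans i =>
            match PySem.List.pyGet? strings i with
            | none => ans
            | some t => if t ≠ s then max ans (PySem.Str.len t + PySem.Str.len s - 2) else ans)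
          ans)
      else ans)
    = match pvBestOther (strings.filter (fun t => pvPref t == p)) s with
      | none => ans
      | some m => max ans (m + PySem.Str.len s - 2) := by
  by_cases hc : (((PySem.List.enumerate strings 0).foldl
      (fun d q => d.modify (pvPref q.2) [] (fun x => x ++ [q.1]))
      (PySem.Dict.empty : PySem.Dict String (List Int))).contains p) = true
  · rw [if_pos hc, tableA_getD, List.foldl_map]
    rw [PySem.List.foldl_congr_mem
      ((PySem.List.enumerate strings 0).filter (fun q => pvPref q.2 == p))
      _ (fun a q => if q.2 ≠ s then max a (PySem.Str.len q.2 + PySem.Str.len s - 2) else a) ans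
      (by
        intro acc q hq
        rw [enum_lookup strings q (List.mem_of_mem_filter hq)])]
    have hback :
        ((PySem.List.enumerate strings 0).filter (fun q => pvPref q.2 == p)).foldl
          (fun a q => if q.2 ≠ s then max a (PySem.Str.len q.2 + PySem.Str.len s - 2) else a) ans
        = (((PySem.List.enumerate strings 0).filter (fun q => pvPref q.2 == p)).map
            (fun q => q.2)).foldl
          (fun a t => if t ≠ s then max a (PySem.Str.len t + PySem.Str.len s - 2) else a) ans :=
      (List.foldl_map (f := fun q : Int × String => q.2)
        (g := fun a t => if t ≠ s then max a (PySem.Str.len t + PySem.Str.len s - 2) else a)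
        (l := (PySem.List.enumerate strings 0).filter (fun q => pvPref q.2 == p))
        (init := ans)).symm
    rw [hback, filter_enum_snd, foldA_eq_bestOther]
  · rw [if_neg hc, tableA_contains strings p (by simpa using hc)]
    rfl


theorem stepB_eq (strings : List String) (p s : String) (ans : Int) :
    (match ((strings.foldl (fun d s =>
        match pvTop2Step (d.get? (pvPref s)) s with
        | none => d
        | some ne => d.insert (pvPref s) ne)
        (PySem.Dict.empty : PySem.Dict String (String × Int × Option Int))).get? p) with
     | none => ans
     | some (v1, l1, l2) =>
       match (if v1 ≠ s then some l1 else l2) with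
       | none => ans
       | some b => max ans (b + PySem.Str.len s - 2))
    = match pvBestOther (strings.filter (fun t => pvPref t == p)) s with
      | none => ans
      | some m => max ans (m + PySem.Str.len s - 2) := by
  rw [tableB_get?, PySem.Dict.get?_empty]
  have hinv : pvInv (strings.filter (fun t => pvPref t == p))
      ((strings.filter (fun t => pvPref t == p)).foldl pvOStep none) := by
    have := pvInv_fold (strings.filter (fun t => pvPref t == p)) [] none rfl
    simpa using this
  have hq := pvInv_query _ _ s hinv
  cases ho : (strings.filter (fun t => pvPref t == p)).foldl pvOStep none with
  | none =>
    rw [ho] at hq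
    have hq2 : (none : Option Int)
        = pvBestOther (strings.filter (fun t => pvPref t == p)) s := hq
    rw [← hq2]
  | some e =>
    obtain ⟨v1, l1, l2⟩ := e
    rw [ho] at hq
    have hq2 : (if v1 ≠ s then some l1 else l2)
        = pvBestOther (strings.filter (fun t => pvPref t == p)) s := hq
    show (match (if v1 ≠ s then some l1 else l2) with
          | none => ans
          | some b => max ans (b + PySem.Str.len s - 2))
        = match pvBestOther (strings.filter (fun t => pvPref t == p)) s with
          | none => ans
          | some m => max ans (m + PySem.Str.len s - 2)
    rw [hq2]

-- ===== VERDICT (by name: the statement is the Claim_ definition above) =====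
theorem maximumConcatenateLength_brute_force_spec : Claim_equal_maximumConcatenateLength_brute_force := by
  intro strings _
  unfold Spec_maximumConcatenateLength_brute_force
  simp only [maximumConcatenateLength_brute_force, maximumConcatenateLength_brute_force_alt]
  refine PySem.List.foldl_congr_mem strings _ _ 0 ?_
  intro acc s _
  exact (stepA_eq strings (pvSuf s) s acc).trans (stepB_eq strings (pvSuf s) s acc).symm
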